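-- pv_equiv track=rewrite | github.com/BNAV01/rbpico-rickroll | payload_rp_gen.py | generate_pico_code
-- ===== SOURCE A (Python) =====
-- def generate_pico_code(text):
--     # Diccionario de mapeo: Carácter -> (HID_KEY, MODIFICADOR)
--     # Ajustado para teclado ESPAÑOL (QWERTY ES)
--     mapping = {
--         'a': ('HID_KEY_A', '0'), 'b': ('HID_KEY_B', '0'), 'c': ('HID_KEY_C', '0'),
--         'd': ('HID_KEY_D', '0'), 'e': ('HID_KEY_E', '0'), 'f': ('HID_KEY_F', '0'),
--         'g': ('HID_KEY_G', '0'), 'h': ('HID_KEY_H', '0'), 'i': ('HID_KEY_I', '0'),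
--         'j': ('HID_KEY_J', '0'), 'k': ('HID_KEY_K', '0'), 'l': ('HID_KEY_L', '0'),
--         'm': ('HID_KEY_M', '0'), 'n': ('HID_KEY_N', '0'), 'o': ('HID_KEY_O', '0'),
--         'p': ('HID_KEY_P', '0'), 'q': ('HID_KEY_Q', '0'), 'r': ('HID_KEY_R', '0'),
--         's': ('HID_KEY_S', '0'), 't': ('HID_KEY_T', '0'), 'u': ('HID_KEY_U', '0'),
--         'v': ('HID_KEY_V', '0'), 'w': ('HID_KEY_W', '0'), 'x': ('HID_KEY_X', '0'),
--         'y': ('HID_KEY_Y', '0'), 'z': ('HID_KEY_Z', '0'),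
--         'A': ('HID_KEY_A', 'KEYBOARD_MODIFIER_LEFTSHIFT'),
--         'B': ('HID_KEY_B', 'KEYBOARD_MODIFIER_LEFTSHIFT'),
--         'C': ('HID_KEY_C', 'KEYBOARD_MODIFIER_LEFTSHIFT'),
--         'D': ('HID_KEY_D', 'KEYBOARD_MODIFIER_LEFTSHIFT'),
--         'E': ('HID_KEY_E', 'KEYBOARD_MODIFIER_LEFTSHIFT'),
--         'F': ('HID_KEY_F', 'KEYBOARD_MODIFIER_LEFTSHIFT'),
--         'G': ('HID_KEY_G', 'KEYBOARD_MODIFIER_LEFTSHIFT'),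
--         'H': ('HID_KEY_H', 'KEYBOARD_MODIFIER_LEFTSHIFT'),
--         'I': ('HID_KEY_I', 'KEYBOARD_MODIFIER_LEFTSHIFT'),
--         'J': ('HID_KEY_J', 'KEYBOARD_MODIFIER_LEFTSHIFT'),
--         'K': ('HID_KEY_K', 'KEYBOARD_MODIFIER_LEFTSHIFT'),
--         'L': ('HID_KEY_L', 'KEYBOARD_MODIFIER_LEFTSHIFT'),
--         'M': ('HID_KEY_M', 'KEYBOARD_MODIFIER_LEFTSHIFT'),
--         'N': ('HID_KEY_N', 'KEYBOARD_MODIFIER_LEFTSHIFT'),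
--         'O': ('HID_KEY_O', 'KEYBOARD_MODIFIER_LEFTSHIFT'),
--         'P': ('HID_KEY_P', 'KEYBOARD_MODIFIER_LEFTSHIFT'),
--         'Q': ('HID_KEY_Q', 'KEYBOARD_MODIFIER_LEFTSHIFT'),
--         'R': ('HID_KEY_R', 'KEYBOARD_MODIFIER_LEFTSHIFT'),
--         'S': ('HID_KEY_S', 'KEYBOARD_MODIFIER_LEFTSHIFT'),
--         'T': ('HID_KEY_T', 'KEYBOARD_MODIFIER_LEFTSHIFT'),
--         'U': ('HID_KEY_U', 'KEYBOARD_MODIFIER_LEFTSHIFT'),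
--         'V': ('HID_KEY_V', 'KEYBOARD_MODIFIER_LEFTSHIFT'),
--         'W': ('HID_KEY_W', 'KEYBOARD_MODIFIER_LEFTSHIFT'),
--         'X': ('HID_KEY_X', 'KEYBOARD_MODIFIER_LEFTSHIFT'),
--         'Y': ('HID_KEY_Y', 'KEYBOARD_MODIFIER_LEFTSHIFT'),
--         'Z': ('HID_KEY_Z', 'KEYBOARD_MODIFIER_LEFTSHIFT'),
--         '1': ('HID_KEY_1', '0'), '2': ('HID_KEY_2', '0'), '3': ('HID_KEY_3', '0'),
--         '4': ('HID_KEY_4', '0'), '5': ('HID_KEY_5', '0'), '6': ('HID_KEY_6', '0'),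
--         '7': ('HID_KEY_7', '0'), '8': ('HID_KEY_8', '0'), '9': ('HID_KEY_9', '0'),
--         '0': ('HID_KEY_0', '0'),
--         '.': ('HID_KEY_PERIOD', '0'),
--         ':': ('HID_KEY_PERIOD', 'KEYBOARD_MODIFIER_LEFTSHIFT'),
--         '/': ('HID_KEY_7', 'KEYBOARD_MODIFIER_LEFTSHIFT'),
--         '-': ('HID_KEY_SLASH', '0'),
--         '_': ('HID_KEY_SLASH', 'KEYBOARD_MODIFIER_LEFTSHIFT'),
--         '=': ('HID_KEY_0', 'KEYBOARD_MODIFIER_LEFTSHIFT'),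
--         '?': ('HID_KEY_MINUS', 'KEYBOARD_MODIFIER_LEFTSHIFT'),
--         '&': ('HID_KEY_6', 'KEYBOARD_MODIFIER_LEFTSHIFT'),
--         ' ': ('HID_KEY_SPACE', '0'),
--     }
--
--     output = []
--     output.append("// --- PAYLOAD GENERADO ---")
--
--     for char in text:
--         if char in mapping:
--             key, mod = mapping[char]
--             output.append(f"send_key({key}, {mod}); // '{char}'")
--         else:
--             output.append(f"// Carácter '{char}' no soportado")
--
--     output.append("send_key(HID_KEY_ENTER, 0);")
--     output.append("// ------------------------")
--
--     return "\n".join(output)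
-- ===== SOURCE B (Python) =====
-- # B: derive letter/digit keycodes by character classification instead of a 63-entry literal table;
-- # only the 9 non-derivable punctuation keys stay in a small residual dict. Same output text.
--
-- RESIDUAL = {
--     '.': ('HID_KEY_PERIOD', '0'),
--     ':': ('HID_KEY_PERIOD', 'KEYBOARD_MODIFIER_LEFTSHIFT'),
--     '/': ('HID_KEY_7', 'KEYBOARD_MODIFIER_LEFTSHIFT'),
--     '-': ('HID_KEY_SLASH', '0'),
--     '_': ('HID_KEY_SLASH', 'KEYBOARD_MODIFIER_LEFTSHIFT'),
--     '=': ('HID_KEY_0', 'KEYBOARD_MODIFIER_LEFTSHIFT'),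
--     '?': ('HID_KEY_MINUS', 'KEYBOARD_MODIFIER_LEFTSHIFT'),
--     '&': ('HID_KEY_6', 'KEYBOARD_MODIFIER_LEFTSHIFT'),
--     ' ': ('HID_KEY_SPACE', '0'),
-- }
--
--
-- def _classify(ch):
--     if 'a' <= ch <= 'z':
--         return ('HID_KEY_' + ch.upper(), '0')
--     if 'A' <= ch <= 'Z':
--         return ('HID_KEY_' + ch, 'KEYBOARD_MODIFIER_LEFTSHIFT')
--     if '0' <= ch <= '9':
--         return ('HID_KEY_' + ch, '0')
--     return RESIDUAL.get(ch)
--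
--
-- def _line(ch):
--     km = _classify(ch)
--     if km is None:
--         return f"// Carácter '{ch}' no soportado"
--     return f"send_key({km[0]}, {km[1]}); // '{ch}'"
--
--
-- def generate_pico_code(text):
--     return "\n".join([
--         "// --- PAYLOAD GENERADO ---",
--         *map(_line, text),
--         "send_key(HID_KEY_ENTER, 0);",
--         "// ------------------------",
--     ])
-- ===== Notes on version B (the rewrite author's own statement) =====
-- stated objective: idiomatic
-- what changed: Replaced A's 63-entry literal character->(key,modifier) table with per-character classification (letter/digit ranges derive the HID key name and shift modifier computationally), keeping only a 9-entry residual dict for punctuation, and built the output as a map over the text instead of an accumulator loop.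
import Mathlib
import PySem

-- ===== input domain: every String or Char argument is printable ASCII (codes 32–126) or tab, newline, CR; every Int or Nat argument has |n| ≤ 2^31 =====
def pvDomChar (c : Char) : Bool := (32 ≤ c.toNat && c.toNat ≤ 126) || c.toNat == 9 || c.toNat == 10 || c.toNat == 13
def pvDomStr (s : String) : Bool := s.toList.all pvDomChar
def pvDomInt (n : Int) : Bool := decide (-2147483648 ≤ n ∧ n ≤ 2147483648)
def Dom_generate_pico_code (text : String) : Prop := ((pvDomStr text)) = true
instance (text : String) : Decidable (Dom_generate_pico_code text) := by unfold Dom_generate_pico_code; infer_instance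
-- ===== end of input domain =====

-- B derives letter/digit keycodes by classification (residual dict only for punctuation) instead of A's 63-entry literal table; objective: idiomatic/simpler, same output.

-- ===== PORT A =====
-- A's literal mapping dict (strings kept as List Char so the kernel can evaluate concatenations).
def pvMappingA : PySem.Dict Char (List Char × List Char) := PySem.Dict.ofList [
  ('a', ("HID_KEY_A".toList, "0".toList)), ('b', ("HID_KEY_B".toList, "0".toList)), ('c', ("HID_KEY_C".toList, "0".toList)),
  ('d', ("HID_KEY_D".toList, "0".toList)), ('e', ("HID_KEY_E".toList, "0".toList)), ('f', ("HID_KEY_F".toList, "0".toList)),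
  ('g', ("HID_KEY_G".toList, "0".toList)), ('h', ("HID_KEY_H".toList, "0".toList)), ('i', ("HID_KEY_I".toList, "0".toList)),
  ('j', ("HID_KEY_J".toList, "0".toList)), ('k', ("HID_KEY_K".toList, "0".toList)), ('l', ("HID_KEY_L".toList, "0".toList)),
  ('m', ("HID_KEY_M".toList, "0".toList)), ('n', ("HID_KEY_N".toList, "0".toList)), ('o', ("HID_KEY_O".toList, "0".toList)),
  ('p', ("HID_KEY_P".toList, "0".toList)), ('q', ("HID_KEY_Q".toList, "0".toList)), ('r', ("HID_KEY_R".toList, "0".toList)),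
  ('s', ("HID_KEY_S".toList, "0".toList)), ('t', ("HID_KEY_T".toList, "0".toList)), ('u', ("HID_KEY_U".toList, "0".toList)),
  ('v', ("HID_KEY_V".toList, "0".toList)), ('w', ("HID_KEY_W".toList, "0".toList)), ('x', ("HID_KEY_X".toList, "0".toList)),
  ('y', ("HID_KEY_Y".toList, "0".toList)), ('z', ("HID_KEY_Z".toList, "0".toList)),
  ('A', ("HID_KEY_A".toList, "KEYBOARD_MODIFIER_LEFTSHIFT".toList)),
  ('B', ("HID_KEY_B".toList, "KEYBOARD_MODIFIER_LEFTSHIFT".toList)),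
  ('C', ("HID_KEY_C".toList, "KEYBOARD_MODIFIER_LEFTSHIFT".toList)),
  ('D', ("HID_KEY_D".toList, "KEYBOARD_MODIFIER_LEFTSHIFT".toList)),
  ('E', ("HID_KEY_E".toList, "KEYBOARD_MODIFIER_LEFTSHIFT".toList)),
  ('F', ("HID_KEY_F".toList, "KEYBOARD_MODIFIER_LEFTSHIFT".toList)),
  ('G', ("HID_KEY_G".toList, "KEYBOARD_MODIFIER_LEFTSHIFT".toList)),
  ('H', ("HID_KEY_H".toList, "KEYBOARD_MODIFIER_LEFTSHIFT".toList)),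
  ('I', ("HID_KEY_I".toList, "KEYBOARD_MODIFIER_LEFTSHIFT".toList)),
  ('J', ("HID_KEY_J".toList, "KEYBOARD_MODIFIER_LEFTSHIFT".toList)),
  ('K', ("HID_KEY_K".toList, "KEYBOARD_MODIFIER_LEFTSHIFT".toList)),
  ('L', ("HID_KEY_L".toList, "KEYBOARD_MODIFIER_LEFTSHIFT".toList)),
  ('M', ("HID_KEY_M".toList, "KEYBOARD_MODIFIER_LEFTSHIFT".toList)),
  ('N', ("HID_KEY_N".toList, "KEYBOARD_MODIFIER_LEFTSHIFT".toList)),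
  ('O', ("HID_KEY_O".toList, "KEYBOARD_MODIFIER_LEFTSHIFT".toList)),
  ('P', ("HID_KEY_P".toList, "KEYBOARD_MODIFIER_LEFTSHIFT".toList)),
  ('Q', ("HID_KEY_Q".toList, "KEYBOARD_MODIFIER_LEFTSHIFT".toList)),
  ('R', ("HID_KEY_R".toList, "KEYBOARD_MODIFIER_LEFTSHIFT".toList)),
  ('S', ("HID_KEY_S".toList, "KEYBOARD_MODIFIER_LEFTSHIFT".toList)),
  ('T', ("HID_KEY_T".toList, "KEYBOARD_MODIFIER_LEFTSHIFT".toList)),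
  ('U', ("HID_KEY_U".toList, "KEYBOARD_MODIFIER_LEFTSHIFT".toList)),
  ('V', ("HID_KEY_V".toList, "KEYBOARD_MODIFIER_LEFTSHIFT".toList)),
  ('W', ("HID_KEY_W".toList, "KEYBOARD_MODIFIER_LEFTSHIFT".toList)),
  ('X', ("HID_KEY_X".toList, "KEYBOARD_MODIFIER_LEFTSHIFT".toList)),
  ('Y', ("HID_KEY_Y".toList, "KEYBOARD_MODIFIER_LEFTSHIFT".toList)),
  ('Z', ("HID_KEY_Z".toList, "KEYBOARD_MODIFIER_LEFTSHIFT".toList)),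
  ('1', ("HID_KEY_1".toList, "0".toList)), ('2', ("HID_KEY_2".toList, "0".toList)), ('3', ("HID_KEY_3".toList, "0".toList)),
  ('4', ("HID_KEY_4".toList, "0".toList)), ('5', ("HID_KEY_5".toList, "0".toList)), ('6', ("HID_KEY_6".toList, "0".toList)),
  ('7', ("HID_KEY_7".toList, "0".toList)), ('8', ("HID_KEY_8".toList, "0".toList)), ('9', ("HID_KEY_9".toList, "0".toList)),
  ('0', ("HID_KEY_0".toList, "0".toList)),
  ('.', ("HID_KEY_PERIOD".toList, "0".toList)),
  (':', ("HID_KEY_PERIOD".toList, "KEYBOARD_MODIFIER_LEFTSHIFT".toList)),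
  ('/', ("HID_KEY_7".toList, "KEYBOARD_MODIFIER_LEFTSHIFT".toList)),
  ('-', ("HID_KEY_SLASH".toList, "0".toList)),
  ('_', ("HID_KEY_SLASH".toList, "KEYBOARD_MODIFIER_LEFTSHIFT".toList)),
  ('=', ("HID_KEY_0".toList, "KEYBOARD_MODIFIER_LEFTSHIFT".toList)),
  ('?', ("HID_KEY_MINUS".toList, "KEYBOARD_MODIFIER_LEFTSHIFT".toList)),
  ('&', ("HID_KEY_6".toList, "KEYBOARD_MODIFIER_LEFTSHIFT".toList)),
  (' ', ("HID_KEY_SPACE".toList, "0".toList))]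

-- A's loop body: the line appended for one character (if char in mapping … else …).
def pvLineA (char : Char) : String :=
  match pvMappingA.get? char with
  | some (key, m) =>
      String.ofList ("send_key(".toList ++ key ++ ", ".toList ++ m ++ "); // '".toList ++ [char] ++ "'".toList)
  | none => String.ofList ("// Carácter '".toList ++ [char] ++ "' no soportado".toList)

def generate_pico_code (text : String) : String :=
  let output : List String := ["// --- PAYLOAD GENERADO ---"]
  let output := text.toList.foldl (fun out char => out ++ [pvLineA char]) output
  let output := output ++ ["send_key(HID_KEY_ENTER, 0);", "// ------------------------"]
  PySem.Str.join "\n" output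

-- ===== PORT B =====
def pvResidualB : PySem.Dict Char (List Char × List Char) := PySem.Dict.ofList [
  ('.', ("HID_KEY_PERIOD".toList, "0".toList)),
  (':', ("HID_KEY_PERIOD".toList, "KEYBOARD_MODIFIER_LEFTSHIFT".toList)),
  ('/', ("HID_KEY_7".toList, "KEYBOARD_MODIFIER_LEFTSHIFT".toList)),
  ('-', ("HID_KEY_SLASH".toList, "0".toList)),
  ('_', ("HID_KEY_SLASH".toList, "KEYBOARD_MODIFIER_LEFTSHIFT".toList)),
  ('=', ("HID_KEY_0".toList, "KEYBOARD_MODIFIER_LEFTSHIFT".toList)),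
  ('?', ("HID_KEY_MINUS".toList, "KEYBOARD_MODIFIER_LEFTSHIFT".toList)),
  ('&', ("HID_KEY_6".toList, "KEYBOARD_MODIFIER_LEFTSHIFT".toList)),
  (' ', ("HID_KEY_SPACE".toList, "0".toList))]

def pvClassifyB (ch : Char) : Option (List Char × List Char) :=
  if 'a' ≤ ch ∧ ch ≤ 'z' then some ("HID_KEY_".toList ++ [ch.toUpper], "0".toList)
  else if 'A' ≤ ch ∧ ch ≤ 'Z' then some ("HID_KEY_".toList ++ [ch], "KEYBOARD_MODIFIER_LEFTSHIFT".toList)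
  else if '0' ≤ ch ∧ ch ≤ '9' then some ("HID_KEY_".toList ++ [ch], "0".toList)
  else pvResidualB.get? ch

def pvLineB (ch : Char) : String :=
  match pvClassifyB ch with
  | none => String.ofList ("// Carácter '".toList ++ [ch] ++ "' no soportado".toList)
  | some (k, m) =>
      String.ofList ("send_key(".toList ++ k ++ ", ".toList ++ m ++ "); // '".toList ++ [ch] ++ "'".toList)

def generate_pico_code_alt (text : String) : String :=
  PySem.Str.join "\n" ("// --- PAYLOAD GENERADO ---" ::
    (text.toList.map pvLineB ++ ["send_key(HID_KEY_ENTER, 0);", "// ------------------------"]))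

-- ===== PRECONDITION & SPEC =====
def Spec_generate_pico_code (text : String) (out : String) : Prop := out = generate_pico_code_alt text
instance (text : String) (out : String) : Decidable (Spec_generate_pico_code text out) := by unfold Spec_generate_pico_code; infer_instance

-- ===== CLAIM (what is proved, stated in full; the proofs are below) =====
def Claim_equal_generate_pico_code : Prop := ∀ (text : String), Dom_generate_pico_code text → Spec_generate_pico_code text (generate_pico_code text)

-- ===== LEMMAS AND PROOFS =====
set_option maxRecDepth 4000 in
theorem pvLine_eq_ofNat : ∀ n, n < 128 → pvLineA (Char.ofNat n) = pvLineB (Char.ofNat n) := by decide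

theorem pvLine_eq (c : Char) (h : pvDomChar c = true) : pvLineA c = pvLineB c := by
  have hlt : c.toNat < 128 := by
    simp [pvDomChar, Bool.or_eq_true, Bool.and_eq_true, decide_eq_true_eq, beq_iff_eq] at h
    omega
  have := pvLine_eq_ofNat c.toNat hlt
  rwa [Char.ofNat_toNat] at this

theorem pvFoldl_acc (l : List Char) (init : List String) :
    l.foldl (fun out c => out ++ [pvLineA c]) init = init ++ l.map pvLineA := by
  induction l generalizing init with
  | nil => simp
  | cons c cs ih => simp [List.foldl_cons, ih, List.append_assoc]

-- ===== VERDICT (by name: the statement is the Claim_ definition above) =====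
theorem generate_pico_code_spec : Claim_equal_generate_pico_code := by
  intro text hdom
  unfold Spec_generate_pico_code generate_pico_code generate_pico_code_alt
  have hmap : text.toList.map pvLineA = text.toList.map pvLineB := by
    apply List.map_congr_left
    intro c hc
    exact pvLine_eq c (by
      have := hdom
      unfold Dom_generate_pico_code pvDomStr at this
      exact List.all_eq_true.mp this c hc)
  simp only [pvFoldl_acc, hmap]
  simp
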